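-- pv_equiv track=rewrite | github.com/ElMariuso/Warcraft-GoA-Fury-of-the-Bleeding-Hollow | hansel-tools/wiki_tools/_wiki_cleaning.py | deduplicate_blank_lines
-- ===== SOURCE A (Python) =====
-- def deduplicate_blank_lines(lines: list[str], max_consecutive: int = 2) -> list[str]:
--     """Réduit les lignes vides consécutives à max_consecutive."""
--     result: list[str] = []
--     blank_count = 0
--     for line in lines:
--         if line.strip() == "":
--             blank_count += 1
--             if blank_count <= max_consecutive:
--                 result.append(line)
--         else:
--             blank_count = 0
--             result.append(line)
--     return result
-- ===== SOURCE B (Python) =====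
-- def deduplicate_blank_lines(lines: list[str], max_consecutive: int = 2) -> list[str]:
--     """Run-based rewrite: split into maximal runs of blank / non-blank lines,
--     truncate each blank run to max_consecutive, keep non-blank runs whole."""
--     result: list[str] = []
--     i = 0
--     n = len(lines)
--     while i < n:
--         blank = lines[i].strip() == ""
--         j = i
--         while j < n and (lines[j].strip() == "") == blank:
--             j += 1
--         run = lines[i:j]
--         if blank:
--             result.extend(run[:max(0, max_consecutive)])
--         else:
--             result.extend(run)
--         i = j
--     return result
-- ===== Notes on version B (the rewrite author's own statement) =====
-- stated objective: alternative
-- what changed: Replaced the running blank-counter single pass by a two-pointer run decomposition: find each maximal run of blank/non-blank lines, truncate blank runs to max(0, max_consecutive), keep non-blank runs whole.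
import Mathlib
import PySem

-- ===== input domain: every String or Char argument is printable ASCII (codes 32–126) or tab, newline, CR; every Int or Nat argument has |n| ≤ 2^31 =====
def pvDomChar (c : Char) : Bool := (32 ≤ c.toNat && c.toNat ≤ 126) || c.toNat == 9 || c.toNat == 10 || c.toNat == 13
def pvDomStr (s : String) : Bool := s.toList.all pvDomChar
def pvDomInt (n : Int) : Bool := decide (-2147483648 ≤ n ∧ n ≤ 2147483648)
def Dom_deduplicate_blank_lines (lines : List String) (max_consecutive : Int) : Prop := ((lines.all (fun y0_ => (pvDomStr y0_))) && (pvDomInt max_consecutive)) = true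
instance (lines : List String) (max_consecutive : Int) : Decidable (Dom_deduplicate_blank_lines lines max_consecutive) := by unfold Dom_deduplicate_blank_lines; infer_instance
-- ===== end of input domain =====

-- B replaces A's running blank-counter pass by a two-pointer run decomposition
-- (maximal blank/non-blank runs; blank runs truncated to max(0, max_consecutive)).

-- ===== PORT A =====
-- line.strip() == ""
def pvIsBlank (line : String) : Bool := PySem.Str.strip line == ""

def deduplicate_blank_lines (lines : List String) (max_consecutive : Int) : List String :=
  (lines.foldl (fun (st : List String × Int) line =>
      if pvIsBlank line then
        let bc := st.2 + 1
        (if bc ≤ max_consecutive then st.1 ++ [line] else st.1, bc)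
      else
        (st.1 ++ [line], 0))
    ([], 0)).1

-- ===== PORT B =====
-- the inner while-loop advancing j over the current run = takeWhile/dropWhile on the
-- same-blankness predicate; run[:max(0, mc)] = take of the clamped (nonnegative) count
def pvAltGo (max_consecutive : Int) : List String → List String
  | [] => []
  | l :: rest =>
    let blank := pvIsBlank l
    let run := (l :: rest).takeWhile (fun x => pvIsBlank x == blank)
    let rest' := (l :: rest).dropWhile (fun x => pvIsBlank x == blank)
    (if blank then run.take (max 0 max_consecutive).toNat else run) ++ pvAltGo max_consecutive rest'
  termination_by xs => xs.length
  decreasing_by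
    simp only [List.dropWhile, beq_self_eq_true]
    exact Nat.lt_succ_of_le (List.length_dropWhile_le _ _)

def deduplicate_blank_lines_alt (lines : List String) (max_consecutive : Int) : List String :=
  pvAltGo max_consecutive lines

-- ===== PRECONDITION & SPEC =====
def Spec_deduplicate_blank_lines (lines : List String) (max_consecutive : Int) (out : List String) : Prop := out = deduplicate_blank_lines_alt lines max_consecutive
instance (lines : List String) (max_consecutive : Int) (out : List String) : Decidable (Spec_deduplicate_blank_lines lines max_consecutive out) := by unfold Spec_deduplicate_blank_lines; infer_instance

-- ===== CLAIM (what is proved, stated in full; the proofs are below) =====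
def Claim_equal_deduplicate_blank_lines : Prop := ∀ (lines : List String) (max_consecutive : Int), Dom_deduplicate_blank_lines lines max_consecutive → Spec_deduplicate_blank_lines lines max_consecutive (deduplicate_blank_lines lines max_consecutive)

-- ===== LEMMAS AND PROOFS =====

-- counter-form recursion equal to A's fold
def pvF (mc : Int) : List String → Int → List String
  | [], _ => []
  | l :: rest, bc =>
    if pvIsBlank l then
      (if bc + 1 ≤ mc then [l] else []) ++ pvF mc rest (bc + 1)
    else
      l :: pvF mc rest 0

theorem pvFoldl_eq_pvF (mc : Int) (lines : List String) (acc : List String) (bc : Int) :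
    (lines.foldl (fun (st : List String × Int) line =>
        if pvIsBlank line then
          let b := st.2 + 1
          (if b ≤ mc then st.1 ++ [line] else st.1, b)
        else (st.1 ++ [line], 0)) (acc, bc)).1 = acc ++ pvF mc lines bc := by
  induction lines generalizing acc bc with
  | nil => simp [pvF]
  | cons l rest ih =>
    rw [List.foldl_cons]
    by_cases hb : pvIsBlank l
    · rw [if_pos hb]
      show (List.foldl _ (if bc + 1 ≤ mc then acc ++ [l] else acc, bc + 1) rest).1 = _
      by_cases hle : bc + 1 ≤ mc
      · rw [if_pos hle, ih]
        simp only [pvF, hb, if_true]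
        rw [if_pos hle]
        simp
      · rw [if_neg hle, ih]
        simp only [pvF, hb, if_true]
        rw [if_neg hle]
        simp
    · rw [if_neg hb, ih]
      simp [pvF, hb]

theorem pvF_blank_run (mc : Int) (run rest : List String)
    (h : ∀ x ∈ run, pvIsBlank x = true) (bc : Int) :
    pvF mc (run ++ rest) bc = run.take (mc - bc).toNat ++ pvF mc rest (bc + run.length) := by
  induction run generalizing bc with
  | nil => simp
  | cons l run' ih =>
    have hl : pvIsBlank l = true := h l (by simp)
    simp only [List.cons_append, pvF, hl, if_true]
    rw [ih (fun x hx => h x (by simp [hx]))]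
    have harg : bc + 1 + (run'.length : Int) = bc + ((l :: run').length : Int) := by
      push_cast [List.length_cons]; omega
    rw [harg]
    by_cases hle : bc + 1 ≤ mc
    · have h1 : (mc - bc).toNat = (mc - (bc + 1)).toNat + 1 := by omega
      simp only [h1, List.take_succ_cons, if_pos hle, List.cons_append]
      simp
    · have h0 : (mc - bc).toNat = 0 := by omega
      have h0' : (mc - (bc + 1)).toNat = 0 := by omega
      simp only [h0, h0', List.take_zero, if_neg hle, List.nil_append]

theorem pvF_nonblank_run (mc : Int) (run rest : List String)
    (h : ∀ x ∈ run, pvIsBlank x = false) :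
    pvF mc (run ++ rest) 0 = run ++ pvF mc rest 0 := by
  induction run with
  | nil => simp
  | cons l run' ih =>
    have hl : pvIsBlank l = false := h l (by simp)
    simp only [List.cons_append, pvF, hl]
    rw [ih (fun x hx => h x (by simp [hx]))]
    simp

-- pvF ignores the counter when the list is empty or starts non-blank
theorem pvF_reset (mc : Int) (rest : List String) (bc : Int)
    (h : rest = [] ∨ ∃ l rest', rest = l :: rest' ∧ pvIsBlank l = false) :
    pvF mc rest bc = pvF mc rest 0 := by
  rcases h with h | ⟨l, rest', rfl, hl⟩
  · subst h; simp [pvF]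
  · simp [pvF, hl]

-- one run-step of pvF: peel a maximal same-blankness run
theorem pvF_step (mc : Int) (l : String) (rest : List String) :
    pvF mc (l :: rest) 0 =
      (if pvIsBlank l = true
        then ((l :: rest).takeWhile (fun x => pvIsBlank x == pvIsBlank l)).take (max 0 mc).toNat
        else (l :: rest).takeWhile (fun x => pvIsBlank x == pvIsBlank l))
      ++ pvF mc ((l :: rest).dropWhile (fun x => pvIsBlank x == pvIsBlank l)) 0 := by
  have hrun : ∀ x ∈ (l :: rest).takeWhile (fun x => pvIsBlank x == pvIsBlank l),
      pvIsBlank x = pvIsBlank l := fun z hz => eq_of_beq (List.mem_takeWhile_imp (p := fun x => pvIsBlank x == pvIsBlank l) hz)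
  have hh := List.head?_dropWhile_not (p := fun x => pvIsBlank x == pvIsBlank l) (l := l :: rest)
  conv_lhs => rw [← List.takeWhile_append_dropWhile (p := fun x => pvIsBlank x == pvIsBlank l) (l := l :: rest)]
  by_cases hb : pvIsBlank l = true
  · rw [if_pos hb, pvF_blank_run mc _ _ (fun x hx => (hrun x hx).trans hb) 0]
    congr 1
    · congr 1
      omega
    · apply pvF_reset
      cases hd : (l :: rest).dropWhile (fun x => pvIsBlank x == pvIsBlank l) with
      | nil => exact Or.inl rfl
      | cons l₂ r₂ =>
        refine Or.inr ⟨l₂, r₂, rfl, ?_⟩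
        rw [hd] at hh
        simp only [List.head?_cons] at hh
        cases h2 : pvIsBlank l₂
        · rfl
        · rw [h2, hb] at hh
          simp at hh
  · have hb' : pvIsBlank l = false := by simp at hb; exact hb
    rw [if_neg hb]
    exact pvF_nonblank_run mc _ _ (fun x hx => (hrun x hx).trans hb')

theorem pvF_eq_pvAltGo (mc : Int) (lines : List String) :
    pvF mc lines 0 = pvAltGo mc lines := by
  induction lines using pvAltGo.induct with
  | case1 => simp [pvF, pvAltGo]
  | case2 l rest _b _r ih =>
    have ih' : pvF mc ((l :: rest).dropWhile (fun x => pvIsBlank x == pvIsBlank l)) 0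
        = pvAltGo mc ((l :: rest).dropWhile (fun x => pvIsBlank x == pvIsBlank l)) := ih
    rw [pvAltGo, pvF_step, ih']

-- ===== VERDICT (by name: the statement is the Claim_ definition above) =====
theorem deduplicate_blank_lines_spec : Claim_equal_deduplicate_blank_lines := by
  intro lines mc _
  unfold Spec_deduplicate_blank_lines deduplicate_blank_lines deduplicate_blank_lines_alt
  rw [pvFoldl_eq_pvF, pvF_eq_pvAltGo]
  rfl
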